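-- pv_equiv track=rewrite | github.com/jae961217/Coding_Programmers | py/weekly4.py | solution
-- ===== SOURCE A (Python) =====
-- def solution(table, languages, preference):
--     arr = [i.split() for i in table]
--     res = dict()
--     for i in arr:
--         res[i[0]] = 0
--
--     for iIndex, i in enumerate(languages):
--         for j in arr:
--             if i in j:
--                 res[j[0]] += preference[iIndex] * (6 - j.index(i))
--     res = sorted(res.items(), key=lambda x: (-x[1], x[0]))
--
--     return res[0][0]
-- ===== SOURCE B (Python) =====
-- def solution(table, languages, preference):
--     # weight of each language = total preference attached to it (duplicates summed)
--     weight = {}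
--     for lang, p in zip(languages, preference):
--         weight[lang] = weight.get(lang, 0) + p
--     # one pass over the table: each distinct token of a row contributes
--     # weight * (6 - first position); rows with the same job name accumulate
--     scores = {}
--     for row in table:
--         toks = row.split()
--         s = 0
--         seen = set()
--         for pos, tok in enumerate(toks):
--             if tok not in seen:
--                 seen.add(tok)
--                 s += weight.get(tok, 0) * (6 - pos)
--
--         scores[toks[0]] = scores.get(toks[0], 0) + s
--     return sorted(scores.items(), key=lambda x: (-x[1], x[0]))[0][0]
-- ===== Notes on version B (the rewrite author's own statement) =====
-- stated objective: faster
-- what changed: Instead of scanning every row for every language (membership test plus .index rescan), B builds a weight dict summing preferences per language once and then makes a single pass over the table, adding weight*(6-first position) for each first occurrence of a token.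
import Mathlib
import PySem

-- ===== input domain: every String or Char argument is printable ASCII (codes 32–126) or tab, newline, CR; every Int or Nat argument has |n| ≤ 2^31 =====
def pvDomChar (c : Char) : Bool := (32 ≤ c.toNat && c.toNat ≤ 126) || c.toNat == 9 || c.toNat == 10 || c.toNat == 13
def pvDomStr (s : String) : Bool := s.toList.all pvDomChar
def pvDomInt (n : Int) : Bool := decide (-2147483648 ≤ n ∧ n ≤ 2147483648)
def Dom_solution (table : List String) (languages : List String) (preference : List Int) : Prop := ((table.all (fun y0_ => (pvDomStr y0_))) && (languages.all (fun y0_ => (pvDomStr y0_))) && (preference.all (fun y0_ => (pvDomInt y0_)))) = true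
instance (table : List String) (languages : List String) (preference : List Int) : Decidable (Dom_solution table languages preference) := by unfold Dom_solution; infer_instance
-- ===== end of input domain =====

-- B replaces A's language×row nested scans (a membership test and an .index rescan of every
-- row for every language) by dictionaries built once: token weights summed over the language
-- list, then a single pass over the table adding weight·(6−first position) for each first
-- occurrence of a token in a row. Objective: faster.

-- ===== PORT A =====
def solution (table : List String) (languages : List String) (preference : List Int) : String :=
  -- arr = [i.split() for i in table]
  let arr := table.map (fun i => PySem.Str.split₀ i)
  -- res = dict(); for i in arr: res[i[0]] = 0        (i[0]: total pyGetD form; Pre_ excludes empty rows)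
  let res : PySem.Dict String Int :=
    arr.foldl (fun d i => d.insert (PySem.List.pyGetD i 0 "") 0) PySem.Dict.empty
  -- for iIndex, i in enumerate(languages): for j in arr: if i in j: res[j[0]] += preference[iIndex]*(6-j.index(i))
  --   (preference[iIndex]: total pyGetD form; Pre_ excludes an out-of-range index being reached)
  let res2 : PySem.Dict String Int :=
    (PySem.List.enumerate languages 0).foldl (fun d q =>
      arr.foldl (fun d j =>
        if j.contains q.2 then
          d.insert (PySem.List.pyGetD j 0 "")
            (d.getD (PySem.List.pyGetD j 0 "") 0 +
              PySem.List.pyGetD preference q.1 0 * (6 - (((PySem.List.index? j q.2).getD 0 : Nat) : Int)))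
        else d) d) res
  -- res = sorted(res.items(), key=lambda x: (-x[1], x[0])); return res[0][0]   (res[0]: total form; Pre_ excludes an empty table)
  let srt := PySem.List.sorted2 res2.items (fun x => -x.2) (fun x => x.1)
  (PySem.List.pyGetD srt 0 ("", 0)).1

-- ===== PORT B =====
def solution_alt (table : List String) (languages : List String) (preference : List Int) : String :=
  -- weight = {}; for lang, p in zip(languages, preference): weight[lang] = weight.get(lang, 0) + p
  let weight : PySem.Dict String Int :=
    (languages.zip preference).foldl (fun w q => w.insert q.1 (w.getD q.1 0 + q.2)) PySem.Dict.empty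
  -- scores = {}; for row in table: toks = row.split(); s = 0; seen = set()
  --   for pos, tok in enumerate(toks): if tok not in seen: seen.add(tok); s += weight.get(tok, 0)*(6-pos)
  --   scores[toks[0]] = scores.get(toks[0], 0) + s      (toks[0]: total pyGetD form; Pre_ excludes empty rows)
  let scores : PySem.Dict String Int :=
    table.foldl (fun d row =>
      let toks := PySem.Str.split₀ row
      let st :=
        (PySem.List.enumerate toks 0).foldl
          (fun (st : Int × PySem.Set String) q =>
            if PySem.Set.contains st.2 q.2 then st
            else (st.1 + weight.getD q.2 0 * (6 - q.1), PySem.Set.add st.2 q.2))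
          (0, PySem.Set.empty)
      d.insert (PySem.List.pyGetD toks 0 "")
        (d.getD (PySem.List.pyGetD toks 0 "") 0 + st.1))
      PySem.Dict.empty
  -- return sorted(scores.items(), key=lambda x: (-x[1], x[0]))[0][0]
  let srt := PySem.List.sorted2 scores.items (fun x => -x.2) (fun x => x.1)
  (PySem.List.pyGetD srt 0 ("", 0)).1

-- ===== PRECONDITION & SPEC =====
-- Pre_ = exactly the inputs on which the Python A returns normally: a nonempty table
-- (else res[0] raises IndexError), no row whose split() is empty (else i[0] raises
-- IndexError), and every language occurring as a token of some row has its enumerate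
-- index inside preference (else preference[iIndex] raises IndexError).
def Pre_solution (table : List String) (languages : List String) (preference : List Int) : Prop :=
  table ≠ [] ∧ (∀ r ∈ table, PySem.Str.split₀ r ≠ []) ∧
  (∀ q ∈ PySem.List.enumerate languages 0,
    (∃ r ∈ table, q.2 ∈ PySem.Str.split₀ r) → q.1 < (preference.length : Int))
instance (table : List String) (languages : List String) (preference : List Int) : Decidable (Pre_solution table languages preference) := by unfold Pre_solution; infer_instance

def pvWitness_solution : List String × List String × List Int :=
  (["java backend junior pizza 150", "python frontend senior chicken 100"], ["python", "java"], [5, 3])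

def Spec_solution (table : List String) (languages : List String) (preference : List Int) (out : String) : Prop := out = solution_alt table languages preference
instance (table : List String) (languages : List String) (preference : List Int) (out : String) : Decidable (Spec_solution table languages preference out) := by unfold Spec_solution; infer_instance

-- ===== CLAIM (what is proved, stated in full; the proofs are below) =====
def Claim_equal_solution : Prop := ∀ (table : List String) (languages : List String) (preference : List Int), Dom_solution table languages preference → Pre_solution table languages preference → Spec_solution table languages preference (solution table languages preference)

-- ===== LEMMAS AND PROOFS =====

-- first index of t in j, as an Int (0 when absent; only meaningful when t ∈ j)
def pvIdx (j : List String) (t : String) : Int := (((PySem.List.index? j t).getD 0 : Nat) : Int)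

-- a sum over a filtered list is the sum of an if-indicator over the whole list
theorem pv_sum_filter {α : Type} (l : List α) (p : α → Bool) (f : α → Int) :
    ((l.filter p).map f).sum = (l.map (fun x => if p x then f x else 0)).sum := by
  induction l with
  | nil => rfl
  | cons x xs ih => by_cases h : p x <;> simp [h, ih]

-- double sums over two lists commute
theorem pv_sum_swap {α β : Type} (l1 : List α) (l2 : List β) (f : α → β → Int) :
    (l1.map (fun a => (l2.map (f a)).sum)).sum
      = (l2.map (fun b => (l1.map (fun a => f a b)).sum)).sum := by
  induction l1 with
  | nil => simp
  | cons a l1 ih => simp [ih]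

-- a sum of a one-point indicator over a Nodup list
theorem pv_sum_single (S : List String) (hS : S.Nodup) (a : String) (g : String → Int) :
    (S.map (fun t => if a = t then g t else 0)).sum = if a ∈ S then g a else 0 := by
  induction S with
  | nil => simp
  | cons x xs ih =>
      simp only [List.nodup_cons] at hS
      by_cases h : a = x
      · subst h
        simp [hS.1, ih hS.2]
      · simp [h, ih hS.2]

-- the weight-dict lookup = summed preference of a token over zip(languages, preference)
theorem pv_weight_getD (zs : List (String × Int)) (d : PySem.Dict String Int) (t : String) :
    (zs.foldl (fun w q => w.insert q.1 (w.getD q.1 0 + q.2)) d).getD t 0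
      = d.getD t 0 + ((zs.filter (fun q => q.1 == t)).map (·.2)).sum := by
  induction zs generalizing d with
  | nil => simp
  | cons q zs ih =>
      simp only [List.foldl_cons, ih]
      by_cases h : q.1 = t
      · subst h
        simp [PySem.Dict.getD_insert_self]
        ring
      · rw [PySem.Dict.getD_insert_of_ne (hne := fun hh => h hh.symm)]; simp [h]

-- an enumerate-indexed sum over languages equals the zip sum when the summand vanishes at 0
theorem pv_enum_zip (pref : List Int) (g : String → Int → Int) (hg : ∀ l, g l 0 = 0) :
    ∀ (langs : List String) (k : Nat),
    ((PySem.List.enumerate langs (k:Int)).map (fun q => g q.2 (PySem.List.pyGetD pref q.1 0))).sum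
      = ((langs.zip (pref.drop k)).map (fun q => g q.1 q.2)).sum := by
  intro langs
  induction langs with
  | nil => intro k; simp [PySem.List.enumerate]
  | cons l ls ih =>
      intro k
      rw [PySem.List.enumerate_cons]
      have hk1 : (k:Int) + 1 = ((k+1 : Nat) : Int) := by push_cast; ring
      by_cases h : k < pref.length
      · have hdrop : pref.drop k = pref[k] :: pref.drop (k+1) := List.drop_eq_getElem_cons h
        rw [hdrop, List.zip_cons_cons, List.map_cons, List.map_cons, List.sum_cons, List.sum_cons,
          hk1, ih (k+1)]
        have : PySem.List.pyGetD pref (k:Int) 0 = pref[k] := by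
          simp [PySem.List.pyGetD_natCast, List.getD, List.getElem?_eq_getElem h]
        rw [this]
      · have h1 : pref.drop k = [] := List.drop_eq_nil_of_le (by omega)
        have h2 : pref.drop (k+1) = [] := List.drop_eq_nil_of_le (by omega)
        rw [List.map_cons, List.sum_cons, hk1, ih (k+1), h1, h2]
        have : PySem.List.pyGetD pref (k:Int) 0 = 0 := by
          simp [PySem.List.pyGetD_natCast, List.getD, List.getElem?_eq_none (by omega : pref.length ≤ k)]
        rw [this, hg]
        simp

-- B's seen-set row loop sums weight·(6−(k+first index)) over the distinct unseen tokens
theorem pv_seen_fold (w : String → Int) :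
    ∀ (toks : List String) (k : Nat) (seen : PySem.Set String) (s : Int),
    ((PySem.List.enumerate toks (k:Int)).foldl
       (fun st q => if PySem.Set.contains st.2 q.2 then st
                    else (st.1 + w q.2 * (6 - q.1), PySem.Set.add st.2 q.2)) (s, seen)).1
      = s + (((PySem.Set.ofList toks).filter (fun t => !PySem.Set.contains seen t)).map
               (fun t => w t * (6 - ((k:Int) + pvIdx toks t)))).sum := by
  intro toks
  induction toks with
  | nil => intro k seen s; simp [PySem.List.enumerate, PySem.Set.ofList]
  | cons x xs ih =>
      intro k seen s
      rw [PySem.List.enumerate_cons, List.foldl_cons, PySem.Set.ofList_cons]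
      have hk1 : (k:Int) + 1 = ((k+1 : Nat) : Int) := by push_cast; ring
      by_cases hx : PySem.Set.contains seen x
      · simp only [hx, if_true, hk1, ih (k+1) seen s]
        congr 1
        -- filters: x is dropped on the right since contains seen x; discard-filter = filter
        have hfil : ((PySem.Set.ofList xs).discard x).filter (fun t => !PySem.Set.contains seen t)
            = (PySem.Set.ofList xs).filter (fun t => !PySem.Set.contains seen t) := by
          rw [PySem.Set.discard, List.filter_filter]
          refine List.filter_congr ?_
          intro t _
          by_cases he : t = x
          · subst he; simp [(PySem.Set.contains_iff _ _).mp hx]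
          · simp [he]
        rw [List.filter_cons]
        simp only [hx, Bool.not_true, Bool.false_eq_true, if_false]
        rw [hfil]
        refine congrArg List.sum (List.map_congr_left ?_)
        intro t ht
        have htm := List.mem_filter.mp ht
        have htx : t ≠ x := by
          intro he; subst he
          have h2 := htm.2; rw [Bool.not_eq_true', PySem.Set.contains_eq_listContains, List.contains_eq_mem, decide_eq_false_iff_not] at h2; exact h2 ((PySem.Set.contains_iff _ _).mp hx)
        have hts : t ∈ xs := by
          have := htm.1
          simpa [PySem.Set.mem_ofList] using this
        have : pvIdx (x :: xs) t = pvIdx xs t + 1 := by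
          unfold pvIdx
          rw [PySem.List.index?_cons_of_ne _ (Ne.symm htx)]
          rcases Option.isSome_iff_exists.mp ((PySem.List.index?_isSome_iff _ _).mpr hts) with ⟨n, hn⟩
          rw [hn]; simp
        rw [this]; push_cast; ring
      · rw [Bool.not_eq_true] at hx
        simp only [hx, Bool.false_eq_true, if_false, hk1, ih (k+1) (PySem.Set.add seen x) (s + w x * (6 - (k:Int)))]
        rw [List.filter_cons]
        simp only [hx, Bool.not_false, if_true]
        rw [List.map_cons, List.sum_cons]
        have hx0 : pvIdx (x :: xs) x = 0 := by
          unfold pvIdx; rw [PySem.List.index?_cons_self]; simp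
        have hfil : ((PySem.Set.ofList xs).discard x).filter (fun t => !PySem.Set.contains seen t)
            = (PySem.Set.ofList xs).filter (fun t => !PySem.Set.contains (PySem.Set.add seen x) t) := by
          rw [PySem.Set.discard, List.filter_filter]
          refine List.filter_congr ?_
          intro t _
          by_cases he : t = x
          · subst he; simp [PySem.Set.mem_add]
          · simp [he, PySem.Set.mem_add]
        rw [hx0, hfil]
        have hmap : ∀ t ∈ (PySem.Set.ofList xs).filter (fun t => !PySem.Set.contains (PySem.Set.add seen x) t),
            w t * (6 - (((k+1:Nat):Int) + pvIdx xs t)) = w t * (6 - ((k:Int) + pvIdx (x::xs) t)) := by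
          intro t ht
          have htm := List.mem_filter.mp ht
          have htx : t ≠ x := by
            intro he; subst he
            have : PySem.Set.contains (PySem.Set.add seen t) t := by
              simp [PySem.Set.contains_eq_listContains, PySem.Set.mem_add]
            simp at htm
          have hts : t ∈ xs := by simpa [PySem.Set.mem_ofList] using htm.1
          have : pvIdx (x :: xs) t = pvIdx xs t + 1 := by
            unfold pvIdx
            rw [PySem.List.index?_cons_of_ne _ (Ne.symm htx)]
            rcases Option.isSome_iff_exists.mp ((PySem.List.index?_isSome_iff _ _).mpr hts) with ⟨n, hn⟩
            rw [hn]; simp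
          rw [this]; push_cast; ring
        rw [List.map_congr_left hmap]
        ring_nf

-- init loop: res[i[0]] = 0
theorem pv_init_items {α : Type} (key : α → String) :
    ∀ (rows : List α) (d : PySem.Dict String Int) (S : List String),
    d.items = S.map (fun k => (k, (0:Int))) → S.Nodup →
    (rows.foldl (fun d j => d.insert (key j) 0) d).items
      = (PySem.Set.update S (rows.map key)).map (fun k => (k, (0:Int))) := by
  intro rows
  induction rows with
  | nil => intro d S h _; simpa [PySem.Set.update] using h
  | cons j rows ih =>
      intro d S h hS
      have hkeys : d.keys = S := by
        simp [PySem.Dict.keys, h, List.map_map, Function.comp_def]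
      rw [List.foldl_cons, List.map_cons, PySem.Set.update_cons]
      by_cases hmem : key j ∈ S
      · have hcont : d.contains (key j) = true := by
          rw [PySem.Dict.contains_eq_decide_mem_keys, hkeys]; simp [hmem]
        have hitems : (d.insert (key j) 0).items = S.map (fun k => (k, (0:Int))) := by
          rw [PySem.Dict.items_insert_of_contains _ _ hcont, h, List.map_map]
          refine List.map_congr_left ?_
          intro k hk
          by_cases he : k = key j
          · subst he; simp
          · simp [he]
        rw [PySem.Set.add_of_mem hmem]
        exact ih _ S hitems hS
      · have hcont : d.contains (key j) = false := by
          rw [PySem.Dict.contains_eq_decide_mem_keys, hkeys]; simp [hmem]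
        have hitems : (d.insert (key j) 0).items = (S ++ [key j]).map (fun k => (k, (0:Int))) := by
          rw [PySem.Dict.items_insert_of_not_contains _ _ hcont, h]; simp
        rw [PySem.Set.add_of_not_mem hmem]
        exact ih _ _ hitems (by simp [List.nodup_append, hS]; intro a ha he; exact hmem (he ▸ ha))

-- conditional accumulate loop over keys already present
theorem pv_bump_loop {α : Type} (key : α → String) (cond : α → Bool) (c : α → Int) :
    ∀ (rows : List α) (d : PySem.Dict String Int) (S : List String) (v : String → Int),
    d.items = S.map (fun k => (k, v k)) → S.Nodup → (∀ j ∈ rows, key j ∈ S) →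
    (rows.foldl (fun d j => if cond j then d.insert (key j) (d.getD (key j) 0 + c j) else d) d).items
      = S.map (fun k => (k, v k + ((rows.filter (fun j => cond j && (key j == k))).map c).sum)) := by
  intro rows
  induction rows with
  | nil => intro d S v h _ _; simpa using h
  | cons j rows ih =>
      intro d S v h hS hkeys
      have hk : d.keys = S := by simp [PySem.Dict.keys, h, List.map_map, Function.comp_def]
      have hknd : d.keys.Nodup := by rw [hk]; exact hS
      rw [List.foldl_cons]
      by_cases hc : cond j
      · have hmem : key j ∈ S := hkeys j (List.mem_cons_self)
        have hcont : d.contains (key j) = true := by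
          rw [PySem.Dict.contains_eq_decide_mem_keys, hk]; simp [hmem]
        have hgd : d.getD (key j) 0 = v (key j) := by
          refine PySem.Dict.getD_of_mem_items d ?_ hknd 0
          rw [h]; exact List.mem_map.mpr ⟨key j, hmem, rfl⟩
        have hitems : (d.insert (key j) (d.getD (key j) 0 + c j)).items
            = S.map (fun k => (k, (fun k => if k = key j then v k + c j else v k) k)) := by
          rw [PySem.Dict.items_insert_of_contains _ _ hcont, h, List.map_map]
          refine List.map_congr_left ?_
          intro k hkmem
          by_cases he : k = key j
          · subst he; simp [hgd]
          · simp [he]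
        rw [if_pos hc, ih _ S _ hitems hS (fun a ha => hkeys a (List.mem_cons_of_mem _ ha))]
        refine List.map_congr_left ?_
        intro k hkmem
        rw [List.filter_cons]
        by_cases he : key j = k
        · simp only [hc, he, beq_self_eq_true, Bool.and_self, if_pos]
          simp [← he, List.sum_cons]
          ring
        · have : (cond j && (key j == k)) = false := by simp [he]
          rw [this]
          simp only [Bool.false_eq_true, if_false]
          rw [if_neg (fun hh => he hh.symm)]
      · rw [if_neg hc, ih _ S v h hS (fun a ha => hkeys a (List.mem_cons_of_mem _ ha))]
        refine List.map_congr_left ?_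
        intro k hkmem
        rw [List.filter_cons]
        have : (cond j && (key j == k)) = false := by simp [hc]
        rw [this]
        simp

-- unconditional accumulate loop that may create keys (scores.get(...,0)+s)
theorem pv_grow_loop {α : Type} (key : α → String) (c : α → Int) :
    ∀ (rows : List α) (d : PySem.Dict String Int) (S : List String) (v : String → Int),
    d.items = S.map (fun k => (k, v k)) → S.Nodup → (∀ k, k ∉ S → v k = 0) →
    (rows.foldl (fun d j => d.insert (key j) (d.getD (key j) 0 + c j)) d).items
      = (PySem.Set.update S (rows.map key)).map
          (fun k => (k, v k + ((rows.filter (fun j => key j == k)).map c).sum)) := by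
  intro rows
  induction rows with
  | nil => intro d S v h _ _; simpa [PySem.Set.update] using h
  | cons j rows ih =>
      intro d S v h hS hv0
      have hk : d.keys = S := by simp [PySem.Dict.keys, h, List.map_map, Function.comp_def]
      have hknd : d.keys.Nodup := by rw [hk]; exact hS
      rw [List.foldl_cons, List.map_cons, PySem.Set.update_cons]
      by_cases hmem : key j ∈ S
      · have hcont : d.contains (key j) = true := by
          rw [PySem.Dict.contains_eq_decide_mem_keys, hk]; simp [hmem]
        have hgd : d.getD (key j) 0 = v (key j) := by
          refine PySem.Dict.getD_of_mem_items d ?_ hknd 0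
          rw [h]; exact List.mem_map.mpr ⟨key j, hmem, rfl⟩
        have hitems : (d.insert (key j) (d.getD (key j) 0 + c j)).items
            = S.map (fun k => (k, (fun k => if k = key j then v k + c j else v k) k)) := by
          rw [PySem.Dict.items_insert_of_contains _ _ hcont, h, List.map_map]
          refine List.map_congr_left ?_
          intro k hkmem
          by_cases he : k = key j
          · subst he; simp [hgd]
          · simp [he]
        have hv0' : ∀ k, k ∉ S → (fun k => if k = key j then v k + c j else v k) k = 0 := by
          intro k hknot
          have : k ≠ key j := fun he => hknot (he ▸ hmem)
          simp [this, hv0 k hknot]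
        rw [PySem.Set.add_of_mem hmem, ih _ S _ hitems hS hv0']
        refine List.map_congr_left ?_
        intro k hkmem
        rw [List.filter_cons]
        by_cases he : key j = k
        · simp only [he, beq_self_eq_true, if_pos]
          simp [← he, List.sum_cons]
          ring
        · have : (key j == k) = false := by simp [he]
          rw [this]
          simp only [Bool.false_eq_true, if_false]
          rw [if_neg (fun hh => he hh.symm)]
      · have hcont : d.contains (key j) = false := by
          rw [PySem.Dict.contains_eq_decide_mem_keys, hk]; simp [hmem]
        have hgd : d.getD (key j) 0 = 0 := PySem.Dict.getD_of_not_contains _ _ hcont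
        have hitems : (d.insert (key j) (d.getD (key j) 0 + c j)).items
            = (S ++ [key j]).map (fun k => (k, (fun k => if k = key j then c j else v k) k)) := by
          rw [PySem.Dict.items_insert_of_not_contains _ _ hcont, h, hgd]
          simp only [List.map_append, List.map_cons, List.map_nil]
          congr 1
          · refine List.map_congr_left ?_
            intro k hkmem
            have : k ≠ key j := fun he => hmem (he ▸ hkmem)
            simp [this]
          · simp
        have hS' : (S ++ [key j]).Nodup := by
          simp [List.nodup_append, hS]
          intro a ha he; exact hmem (he ▸ ha)
        have hv0' : ∀ k, k ∉ S ++ [key j] → (fun k => if k = key j then c j else v k) k = 0 := by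
          intro k hknot
          simp only [List.mem_append, List.mem_singleton, not_or] at hknot
          simp [hknot.2, hv0 k hknot.1]
        rw [PySem.Set.add_of_not_mem hmem, ih _ _ _ hitems hS' hv0']
        refine List.map_congr_left ?_
        intro k hkmem
        rw [List.filter_cons]
        by_cases he : key j = k
        · simp only [he, beq_self_eq_true, if_pos]
          have hkj : k ∉ S := he ▸ hmem
          simp [← he, List.sum_cons, hv0 (key j) hmem]
        · have : (key j == k) = false := by simp [he]
          rw [this]
          simp only [Bool.false_eq_true, if_false]
          rw [if_neg (fun hh => he hh.symm)]

-- outer loop of A: one pv_bump_loop pass per (index, language) pair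
theorem pv_outer_loop {β : Type} (arr : List (List String)) (key : List String → String)
    (cond : β → List String → Bool) (c : β → List String → Int) :
    ∀ (qs : List β) (d : PySem.Dict String Int) (S : List String) (v : String → Int),
    d.items = S.map (fun k => (k, v k)) → S.Nodup → (∀ j ∈ arr, key j ∈ S) →
    (qs.foldl (fun d q => arr.foldl
        (fun d j => if cond q j then d.insert (key j) (d.getD (key j) 0 + c q j) else d) d) d).items
      = S.map (fun k => (k, v k +
          (qs.map (fun q => ((arr.filter (fun j => cond q j && (key j == k))).map (c q)).sum)).sum)) := by
  intro qs
  induction qs with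
  | nil => intro d S v h _ _; simpa using h
  | cons q qs ih =>
      intro d S v h hS hkeys
      rw [List.foldl_cons]
      have hstep := pv_bump_loop key (cond q) (c q) arr d S v h hS hkeys
      rw [ih _ S _ hstep hS hkeys]
      refine List.map_congr_left ?_
      intro k hk
      simp [List.sum_cons]
      ring

-- per-row equality: A's scan over all languages = B's weighted scan over the distinct tokens
theorem pv_row_eq (languages : List String) (preference : List Int) (j : List String) :
    ((PySem.List.enumerate languages 0).map (fun q =>
        if j.contains q.2 then
          PySem.List.pyGetD preference q.1 0 * (6 - pvIdx j q.2)
        else 0)).sum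
      = ((PySem.Set.ofList j).map (fun t =>
          (((languages.zip preference).filter (fun q => q.1 == t)).map (fun q => q.2)).sum
            * (6 - pvIdx j t))).sum := by
  have hg : ∀ l, (fun (l : String) (v : Int) =>
      if j.contains l then v * (6 - pvIdx j l) else 0) l 0 = 0 := by
    intro l; by_cases h : j.contains l <;> simp
  have h1 : ((PySem.List.enumerate languages 0).map (fun q =>
        if j.contains q.2 then PySem.List.pyGetD preference q.1 0 * (6 - pvIdx j q.2) else 0)).sum
      = ((languages.zip preference).map (fun q =>
          if j.contains q.1 then q.2 * (6 - pvIdx j q.1) else 0)).sum := by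
    simpa using pv_enum_zip preference
      (fun l v => if j.contains l then v * (6 - pvIdx j l) else 0) hg languages 0
  rw [h1]
  have h2 : ∀ q : String × Int,
      (if j.contains q.1 then q.2 * (6 - pvIdx j q.1) else 0)
        = ((PySem.Set.ofList j).map (fun t =>
            if q.1 = t then q.2 * (6 - pvIdx j t) else 0)).sum := by
    intro q
    rw [pv_sum_single _ (PySem.Set.nodup_ofList j) q.1 (fun t => q.2 * (6 - pvIdx j t))]
    by_cases h : q.1 ∈ j
    · simp [h, (PySem.Set.mem_ofList _ _).mpr h]
    · have : q.1 ∉ PySem.Set.ofList j := fun hc => h ((PySem.Set.mem_ofList _ _).mp hc)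
      simp [h, this]
  rw [List.map_congr_left (fun q _ => h2 q), pv_sum_swap]
  refine congrArg List.sum (List.map_congr_left ?_)
  intro t _
  rw [← List.sum_map_mul_right, pv_sum_filter]
  refine congrArg List.sum (List.map_congr_left ?_)
  intro q _
  by_cases h : q.1 = t <;> simp [h]

-- per-key equality of the accumulated score sums
theorem pv_value_eq (table : List String) (languages : List String) (preference : List Int)
    (k : String) :
    ((PySem.List.enumerate languages 0).map (fun q =>
        (((table.map (fun i => PySem.Str.split₀ i)).filter (fun j =>
            j.contains q.2 && (PySem.List.pyGetD j 0 "" == k))).map (fun j =>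
          PySem.List.pyGetD preference q.1 0 * (6 - pvIdx j q.2))).sum)).sum
      = ((table.filter (fun row => PySem.List.pyGetD (PySem.Str.split₀ row) 0 "" == k)).map
          (fun row =>
            ((PySem.List.enumerate (PySem.Str.split₀ row) 0).foldl
              (fun (st : Int × PySem.Set String) q =>
                if PySem.Set.contains st.2 q.2 then st
                else (st.1 + ((languages.zip preference).foldl
                    (fun w q => w.insert q.1 (w.getD q.1 0 + q.2)) PySem.Dict.empty).getD q.2 0
                    * (6 - q.1), PySem.Set.add st.2 q.2))
              (0, PySem.Set.empty)).1)).sum := by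
  -- right side: filter → indicator, table sum → split-rows sum, row loop → distinct-token sum
  rw [pv_sum_filter]
  have hright : (table.map (fun row =>
      if PySem.List.pyGetD (PySem.Str.split₀ row) 0 "" == k then
        ((PySem.List.enumerate (PySem.Str.split₀ row) 0).foldl
          (fun (st : Int × PySem.Set String) q =>
            if PySem.Set.contains st.2 q.2 then st
            else (st.1 + ((languages.zip preference).foldl
                (fun w q => w.insert q.1 (w.getD q.1 0 + q.2)) PySem.Dict.empty).getD q.2 0
                * (6 - q.1), PySem.Set.add st.2 q.2))
          (0, PySem.Set.empty)).1
      else 0)).sum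
      = ((table.map (fun i => PySem.Str.split₀ i)).map (fun jj =>
          if PySem.List.pyGetD jj 0 "" == k then
            ((PySem.Set.ofList jj).map (fun t =>
              (((languages.zip preference).filter (fun q => q.1 == t)).map (fun q => q.2)).sum
                * (6 - pvIdx jj t))).sum
          else 0)).sum := by
    rw [List.map_map]
    refine congrArg List.sum (List.map_congr_left ?_)
    intro row _
    simp only [Function.comp_apply]
    by_cases h : PySem.List.pyGetD (PySem.Str.split₀ row) 0 "" == k
    · simp only [h, if_true]
      have hfold := pv_seen_fold
        (fun t => ((languages.zip preference).foldl
          (fun w q => w.insert q.1 (w.getD q.1 0 + q.2)) PySem.Dict.empty).getD t 0)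
        (PySem.Str.split₀ row) 0 PySem.Set.empty 0
      simp only [Nat.cast_zero, zero_add] at hfold
      rw [hfold]
      have hall : (fun t => !PySem.Set.contains (PySem.Set.empty : PySem.Set String) t)
          = (fun _ => true) := by
        funext t; simp [PySem.Set.contains_eq_listContains, PySem.Set.empty]
      rw [hall, List.filter_true]
      refine congrArg List.sum (List.map_congr_left ?_)
      intro t _
      rw [pv_weight_getD]
      simp
    · rw [Bool.not_eq_true] at h
      simp [h]
  rw [hright]
  -- left side: filter → indicator, swap the two sums
  have hA : ∀ q : Int × String,
      (((table.map (fun i => PySem.Str.split₀ i)).filter (fun j =>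
          j.contains q.2 && (PySem.List.pyGetD j 0 "" == k))).map (fun j =>
        PySem.List.pyGetD preference q.1 0 * (6 - pvIdx j q.2))).sum
      = ((table.map (fun i => PySem.Str.split₀ i)).map (fun j =>
          if j.contains q.2 && (PySem.List.pyGetD j 0 "" == k) then
            PySem.List.pyGetD preference q.1 0 * (6 - pvIdx j q.2)
          else 0)).sum := fun q => pv_sum_filter _ _ _
  rw [List.map_congr_left (fun q _ => hA q), pv_sum_swap]
  refine congrArg List.sum (List.map_congr_left ?_)
  intro j _
  by_cases hk : PySem.List.pyGetD j 0 "" == k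
  · simp only [hk, Bool.and_true, if_true]
    exact pv_row_eq languages preference j
  · rw [Bool.not_eq_true] at hk
    simp [hk]

-- the two ports agree (unconditionally: out-of-range preference lookups contribute 0 on
-- both sides, and both total forms use the same defaults)
theorem pv_ports_eq (table : List String) (languages : List String) (preference : List Int) :
    solution table languages preference = solution_alt table languages preference := by
  have h0 : ((table.map (fun i => PySem.Str.split₀ i)).foldl
        (fun d i => d.insert (PySem.List.pyGetD i 0 "") 0) PySem.Dict.empty).items
      = (PySem.Set.ofList ((table.map (fun i => PySem.Str.split₀ i)).map
          (fun j => PySem.List.pyGetD j 0 ""))).map (fun k => (k, (0:Int))) := by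
    have := pv_init_items (fun j => PySem.List.pyGetD j 0 "")
      (table.map (fun i => PySem.Str.split₀ i)) PySem.Dict.empty [] (by rfl) List.nodup_nil
    simpa [PySem.Set.update_nil_left] using this
  have hkeys : ∀ j ∈ table.map (fun i => PySem.Str.split₀ i),
      PySem.List.pyGetD j 0 "" ∈ PySem.Set.ofList ((table.map (fun i => PySem.Str.split₀ i)).map
        (fun j => PySem.List.pyGetD j 0 "")) := by
    intro j hj
    exact (PySem.Set.mem_ofList _ _).mpr (List.mem_map_of_mem hj)
  have hAitems := pv_outer_loop (table.map (fun i => PySem.Str.split₀ i))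
    (fun j => PySem.List.pyGetD j 0 "")
    (fun (q : Int × String) (j : List String) => j.contains q.2)
    (fun (q : Int × String) (j : List String) =>
      PySem.List.pyGetD preference q.1 0 * (6 - (((PySem.List.index? j q.2).getD 0 : Nat) : Int)))
    (PySem.List.enumerate languages 0) _ _ (fun _ => 0) h0
    (PySem.Set.nodup_ofList _) hkeys
  have hBitems := pv_grow_loop
    (fun row => PySem.List.pyGetD (PySem.Str.split₀ row) 0 "")
    (fun row =>
      ((PySem.List.enumerate (PySem.Str.split₀ row) 0).foldl
        (fun (st : Int × PySem.Set String) q =>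
          if PySem.Set.contains st.2 q.2 then st
          else (st.1 + ((languages.zip preference).foldl
              (fun w q => w.insert q.1 (w.getD q.1 0 + q.2)) PySem.Dict.empty).getD q.2 0
              * (6 - q.1), PySem.Set.add st.2 q.2))
        (0, PySem.Set.empty)).1)
    table PySem.Dict.empty [] (fun _ => 0) (by rfl) List.nodup_nil (fun _ _ => rfl)
  have hS : (table.map (fun i => PySem.Str.split₀ i)).map (fun j => PySem.List.pyGetD j 0 "")
      = table.map (fun row => PySem.List.pyGetD (PySem.Str.split₀ row) 0 "") := by
    rw [List.map_map]; rfl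
  rw [PySem.Set.update_nil_left, ← hS] at hBitems
  simp only [solution, solution_alt]
  rw [hAitems, hBitems]
  have hmaps : ∀ k ∈ PySem.Set.ofList ((table.map (fun i => PySem.Str.split₀ i)).map
      (fun j => PySem.List.pyGetD j 0 "")),
      ((fun k => (k, (fun _ => (0:Int)) k +
        ((PySem.List.enumerate languages 0).map (fun q =>
          (((table.map (fun i => PySem.Str.split₀ i)).filter (fun j =>
              j.contains q.2 && (PySem.List.pyGetD j 0 "" == k))).map (fun j =>
            PySem.List.pyGetD preference q.1 0 *
              (6 - (((PySem.List.index? j q.2).getD 0 : Nat) : Int)))).sum)).sum)) k : String × Int)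
      = (fun k => (k, (fun _ => (0:Int)) k +
        ((table.filter (fun row => PySem.List.pyGetD (PySem.Str.split₀ row) 0 "" == k)).map
          (fun row =>
            ((PySem.List.enumerate (PySem.Str.split₀ row) 0).foldl
              (fun (st : Int × PySem.Set String) q =>
                if PySem.Set.contains st.2 q.2 then st
                else (st.1 + ((languages.zip preference).foldl
                    (fun w q => w.insert q.1 (w.getD q.1 0 + q.2)) PySem.Dict.empty).getD q.2 0
                    * (6 - q.1), PySem.Set.add st.2 q.2))
              (0, PySem.Set.empty)).1)).sum)) k := by
    intro k _
    have hval := pv_value_eq table languages preference k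
    simp only [pvIdx] at hval
    simp only [zero_add, hval]
  rw [List.map_congr_left hmaps]

-- ===== VERDICT (by name: the statement is the Claim_ definition above) =====
theorem solution_spec : Claim_equal_solution := by
  intro table languages preference _ _
  unfold Spec_solution
  exact pv_ports_eq table languages preference
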